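-- pv_equiv track=rewrite | github.com/xiaoxTM/sigma | ops/core/commons.py | shape_statistics
-- ===== SOURCE A (Python) =====
-- def shape_statistics(shape):
--     """ statistics shapes in shape_list
--         that how many Nones and -1s
--         For example:
--         > shape_list [None, 1, 3, 2, 4, -1, None]
--         > stats = {'None':[0, 6], '-1':[5]}
--     """
--     stats = {'nones': [], '-1': []}
--     for idx, s in enumerate(shape):
--         if s is None:
--             stats['nones'].append(idx)
--         elif s == -1:
--             stats['-1'].append(idx)
--     return stats
-- ===== SOURCE B (Python) =====
-- def shape_statistics(shape):
--     # Build a full value -> indices index in one grouping pass,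
--     # then read the two buckets of interest off it.
--     groups = {}
--     for i, s in enumerate(shape):
--         groups.setdefault(s, []).append(i)
--     return {'nones': groups.get(None, []), '-1': groups.get(-1, [])}
-- ===== Notes on version B (the rewrite author's own statement) =====
-- stated objective: alternative
-- what changed: Instead of a branching loop that tests each element against None and -1 and appends to the right bucket, B builds a generic value-to-indices grouping index (dict of all values) in one pass and then answers by two dictionary lookups (None and -1).
import Mathlib
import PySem

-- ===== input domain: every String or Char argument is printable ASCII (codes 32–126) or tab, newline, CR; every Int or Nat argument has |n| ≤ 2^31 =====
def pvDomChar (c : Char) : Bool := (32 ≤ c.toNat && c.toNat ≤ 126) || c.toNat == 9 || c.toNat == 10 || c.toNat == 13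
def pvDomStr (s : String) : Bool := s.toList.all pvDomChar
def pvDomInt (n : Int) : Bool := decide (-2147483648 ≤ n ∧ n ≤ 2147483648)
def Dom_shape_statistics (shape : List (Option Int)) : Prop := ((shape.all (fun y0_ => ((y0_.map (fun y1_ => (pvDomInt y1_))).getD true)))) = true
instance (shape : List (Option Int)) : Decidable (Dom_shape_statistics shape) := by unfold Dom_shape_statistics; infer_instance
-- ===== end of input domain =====

-- B replaces A's branching two-bucket loop with a generic value->indices
-- grouping index built in one pass, answered by two dictionary lookups.

-- ===== PORT A =====
-- A: stats = {'nones': [], '-1': []}; loop over enumerate(shape) appending the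
-- index to the matching bucket; return the dict (association list, key order fixed).
def shape_statistics (shape : List (Option Int)) : List (String × List Int) :=
  let stats :=
    (PySem.List.enumerate shape).foldl
      (fun (st : List Int × List Int) p =>
        match p.2 with
        | none => (st.1 ++ [p.1], st.2)
        | some s => if s = -1 then (st.1, st.2 ++ [p.1]) else st)
      ([], [])
  [("nones", stats.1), ("-1", stats.2)]

-- ===== PORT B =====
-- B: groups = {}; for i, s in enumerate(shape): groups.setdefault(s, []).append(i)
--    (= d.modify s [] (· ++ [i])); return {'nones': groups.get(None, []), '-1': groups.get(-1, [])}.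
def shape_statistics_alt (shape : List (Option Int)) : List (String × List Int) :=
  let groups :=
    (PySem.List.enumerate shape).foldl
      (fun (d : PySem.Dict (Option Int) (List Int)) p => d.modify p.2 [] (· ++ [p.1]))
      PySem.Dict.empty
  [("nones", groups.getD none []), ("-1", groups.getD (some (-1)) [])]

-- ===== PRECONDITION & SPEC =====
def Spec_shape_statistics (shape : List (Option Int)) (out : List (String × List Int)) : Prop := out = shape_statistics_alt shape
instance (shape : List (Option Int)) (out : List (String × List Int)) : Decidable (Spec_shape_statistics shape out) := by unfold Spec_shape_statistics; infer_instance

-- ===== CLAIM (what is proved, stated in full; the proofs are below) =====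
def Claim_equal_shape_statistics : Prop := ∀ (shape : List (Option Int)), Dom_shape_statistics shape → Spec_shape_statistics shape (shape_statistics shape)

-- ===== LEMMAS AND PROOFS =====
-- A's paired loop state equals the two per-key filters.
theorem shape_foldl_eq (l : List (Int × Option Int)) (a b : List Int) :
    l.foldl
      (fun (st : List Int × List Int) p =>
        match p.2 with
        | none => (st.1 ++ [p.1], st.2)
        | some s => if s = -1 then (st.1, st.2 ++ [p.1]) else st)
      (a, b)
    = (a ++ l.filterMap (fun p => if p.2 = none then some p.1 else none),
       b ++ l.filterMap (fun p => if p.2 = some (-1) then some p.1 else none)) := by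
  induction l generalizing a b with
  | nil => simp
  | cons x xs ih =>
    match hx : x.2 with
    | none => simp [List.foldl_cons, hx, ih]
    | some s =>
      by_cases hs : s = -1 <;> simp [List.foldl_cons, hx, hs, ih]

-- filtering the swapped pairs on the key reads off the per-key filterMap
theorem swap_filter_map (l : List (Int × Option Int)) (k : Option Int) :
    ((l.map Prod.swap).filter (fun p => p.1 == k)).map (·.2)
    = l.filterMap (fun p => if p.2 = k then some p.1 else none) := by
  induction l with
  | nil => simp
  | cons x xs ih =>
    by_cases hx : x.2 = k <;> simp [Prod.swap, hx, ih]

-- B's grouping dict looked up at k equals the per-key filter.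
theorem group_getD (l : List (Int × Option Int)) (k : Option Int) :
    ((l.foldl
        (fun (d : PySem.Dict (Option Int) (List Int)) p => d.modify p.2 [] (· ++ [p.1]))
        PySem.Dict.empty).getD k [])
    = l.filterMap (fun p => if p.2 = k then some p.1 else none) := by
  have hswap :
      l.foldl
        (fun (d : PySem.Dict (Option Int) (List Int)) p => d.modify p.2 [] (· ++ [p.1]))
        PySem.Dict.empty
      = (l.map Prod.swap).foldl
        (fun (d : PySem.Dict (Option Int) (List Int)) p => d.modify p.1 [] (· ++ [p.2]))
        PySem.Dict.empty := by
    rw [List.foldl_map]; simp [Prod.swap]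
  rw [hswap, PySem.Dict.getD_foldl_modify_append]
  simp only [PySem.Dict.getD_empty, List.nil_append]
  exact swap_filter_map l k

-- ===== VERDICT (by name: the statement is the Claim_ definition above) =====
theorem shape_statistics_spec : Claim_equal_shape_statistics := by
  intro shape _
  unfold Spec_shape_statistics shape_statistics shape_statistics_alt
  simp [shape_foldl_eq, group_getD]
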